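-- pv_equiv track=rewrite | github.com/SpaceManiac/sublime-dm-langclient | toggle_ticked.py | sort_less
-- ===== SOURCE A (Python) =====
-- def sort_less(a, b):
-- 	parts_a, parts_b = a.split("\\"), b.split("\\")
-- 	i = 0
-- 	while True:
-- 		part_a, part_b = parts_a[i].lower(), parts_b[i].lower()
-- 		if i == len(parts_a) - 1 and i == len(parts_b) - 1:
-- 			# files in the same directory sort by their extension first
-- 			bits_a, bits_b = part_a.split("."), part_b.split(".")
-- 			ext_a, ext_b = bits_a[-1], bits_b[-1]
-- 			if ext_a != ext_b:
-- 				return ext_a < ext_b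
-- 			# and then by their filename
-- 			return part_a < part_b
-- 		elif i == len(parts_a) - 1:
-- 			# files sort before directories
-- 			return True
-- 		elif i == len(parts_b) - 1:
-- 			# directories sort after files
-- 			return False
-- 		elif part_a != part_b:
-- 			# directories sort by their name
-- 			return part_a < part_b
-- 		i += 1
-- ===== SOURCE B (Python) =====
-- def sort_less(a, b):
-- 	def key(path):
-- 		comps = [c.lower() for c in path.split("\\")]
-- 		last = comps[-1]
-- 		return [(1, c) for c in comps[:-1]] + [(0, last.split(".")[-1], last)]
-- 	return key(a) < key(b)
-- ===== Notes on version B (the rewrite author's own statement) =====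
-- stated objective: idiomatic
-- what changed: Replaces A's indexed while-loop with interleaved length/equality branch tests by an independent per-path sort key (directories as (1,name), the terminal file as (0,ext,name)) compared with Python's built-in lexicographic list/tuple comparison.
import Mathlib
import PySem

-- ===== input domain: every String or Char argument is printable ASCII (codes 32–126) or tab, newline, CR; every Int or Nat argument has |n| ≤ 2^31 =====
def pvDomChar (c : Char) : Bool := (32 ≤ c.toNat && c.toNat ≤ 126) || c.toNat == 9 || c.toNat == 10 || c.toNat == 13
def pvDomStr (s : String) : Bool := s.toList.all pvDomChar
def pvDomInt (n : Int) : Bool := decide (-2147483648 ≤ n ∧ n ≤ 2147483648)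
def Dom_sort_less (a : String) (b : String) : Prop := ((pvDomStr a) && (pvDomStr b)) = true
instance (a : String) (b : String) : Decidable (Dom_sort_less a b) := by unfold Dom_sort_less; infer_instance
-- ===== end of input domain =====

-- B replaces A's indexed while-loop of interleaved length/equality tests by building an
-- independent sort key per path and comparing the keys lexicographically (idiomatic, same cost).

-- ===== PORT A =====
-- A's `while True` loop over index i, transcribed as structural recursion on the two
-- suffixes of the split lists (i == len-1  ↔  the suffix is a singleton).
def sort_less_loop : List (List Char) → List (List Char) → Bool
  | [pa], [pb] =>
      let part_a := PySem.Chars.lower pa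
      let part_b := PySem.Chars.lower pb
      let ext_a := PySem.List.pyGetD (PySem.Chars.splitOn part_a ['.']) (-1) []
      let ext_b := PySem.List.pyGetD (PySem.Chars.splitOn part_b ['.']) (-1) []
      if ext_a ≠ ext_b then PySem.Chars.strLt ext_a ext_b
      else PySem.Chars.strLt part_a part_b
  | [_], _ :: _ :: _ => true
  | _ :: _ :: _, [_] => false
  | pa :: ra, pb :: rb =>
      if PySem.Chars.lower pa ≠ PySem.Chars.lower pb then
        PySem.Chars.strLt (PySem.Chars.lower pa) (PySem.Chars.lower pb)
      else sort_less_loop ra rb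
  | _, _ => false  -- unreachable: splitOn never returns []

def sort_less (a : String) (b : String) : Bool :=
  sort_less_loop (PySem.Chars.splitOn a.toList ['\\']) (PySem.Chars.splitOn b.toList ['\\'])

-- ===== PORT B =====
-- B's tuple keys: (1, name) for a directory component, (0, ext, name) for the final file.
inductive SortKey
  | dir : List Char → SortKey
  | file : List Char → List Char → SortKey   -- ext, name
deriving DecidableEq, Repr

-- Python's `<` on the key tuples (first component 0/1 compared first).
def keyElemLt : SortKey → SortKey → Bool
  | .dir n1, .dir n2 => PySem.Chars.strLt n1 n2
  | .file _ _, .dir _ => true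
  | .dir _, .file _ _ => false
  | .file e1 n1, .file e2 n2 =>
      PySem.Chars.strLt e1 e2 || (e1 = e2 && PySem.Chars.strLt n1 n2)

-- Python's `<` on lists of such tuples.
def keyListLt : List SortKey → List SortKey → Bool
  | [], [] => false
  | [], _ :: _ => true
  | _ :: _, [] => false
  | x :: xs, y :: ys => if x = y then keyListLt xs ys else keyElemLt x y

-- key(path) of Source B, applied to the already-lowercased components.
def pathKey (comps : List (List Char)) : List SortKey :=
  let last := PySem.List.pyGetD comps (-1) []
  (PySem.List.slice comps none (some (-1))).map SortKey.dir
    ++ [SortKey.file (PySem.List.pyGetD (PySem.Chars.splitOn last ['.']) (-1) []) last]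

def sort_less_alt (a : String) (b : String) : Bool :=
  keyListLt (pathKey ((PySem.Chars.splitOn a.toList ['\\']).map PySem.Chars.lower))
            (pathKey ((PySem.Chars.splitOn b.toList ['\\']).map PySem.Chars.lower))

-- ===== PRECONDITION & SPEC =====
def Spec_sort_less (a : String) (b : String) (out : Bool) : Prop := out = sort_less_alt a b
instance (a : String) (b : String) (out : Bool) : Decidable (Spec_sort_less a b out) := by unfold Spec_sort_less; infer_instance

-- ===== CLAIM (what is proved, stated in full; the proofs are below) =====
def Claim_equal_sort_less : Prop := ∀ (a : String) (b : String), Dom_sort_less a b → Spec_sort_less a b (sort_less a b)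

-- ===== LEMMAS AND PROOFS =====

theorem splitOn_go_ne_nil (sep : List Char) : ∀ (fuel : Nat) (l cur : List Char) (acc : List (List Char)),
    PySem.Chars.splitOn.go sep fuel l cur acc ≠ [] := by
  intro fuel
  induction fuel with
  | zero => intro l cur acc; rw [PySem.Chars.splitOn.go]; simp
  | succ n ih =>
      intro l cur acc
      cases l with
      | nil => rw [PySem.Chars.splitOn.go]; simp; omega
      | cons c rest =>
          rw [PySem.Chars.splitOn.go]
          split
          · exact ih _ _ _
          · exact ih _ _ _

theorem splitOn_ne_nil (cs sep : List Char) : PySem.Chars.splitOn cs sep ≠ [] :=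
  splitOn_go_ne_nil sep _ cs [] []

theorem strLt_self (x : List Char) : PySem.Chars.strLt x x = false := by
  simp [PySem.Chars.strLt]

theorem pyGetD_last_singleton (x : List Char) : PySem.List.pyGetD [x] (-1) [] = x := by
  simp [PySem.List.pyGetD, PySem.List.pyIdx?, PySem.List.pyGet?]

theorem pyGetD_last_cons_cons (x y : List Char) (r : List (List Char)) :
    PySem.List.pyGetD (x :: y :: r) (-1) ([] : List Char) = PySem.List.pyGetD (y :: r) (-1) [] := by
  rw [PySem.List.pyGetD_neg_one _ _ (by simp), PySem.List.pyGetD_neg_one _ _ (by simp)]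
  simp [List.getLast_cons]

theorem pathKey_singleton (x : List Char) :
    pathKey [x] = [SortKey.file (PySem.List.pyGetD (PySem.Chars.splitOn x ['.']) (-1) []) x] := by
  simp [pathKey, PySem.List.slice_to_neg_one, pyGetD_last_singleton]

theorem pathKey_cons_cons (x y : List Char) (r : List (List Char)) :
    pathKey (x :: y :: r) = SortKey.dir x :: pathKey (y :: r) := by
  simp [pathKey, PySem.List.slice_to_neg_one, pyGetD_last_cons_cons]

theorem loop_eq_keys : ∀ (pa pb : List (List Char)), pa ≠ [] → pb ≠ [] →
    sort_less_loop pa pb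
      = keyListLt (pathKey (pa.map PySem.Chars.lower)) (pathKey (pb.map PySem.Chars.lower)) := by
  intro pa
  induction pa with
  | nil => intro pb h _; exact absurd rfl h
  | cons x xs ih =>
      intro pb _ hpb
      cases pb with
      | nil => exact absurd rfl hpb
      | cons y ys =>
          cases xs with
          | nil =>
              cases ys with
              | nil =>
                  simp only [List.map, pathKey_singleton, sort_less_loop, keyListLt, keyElemLt]
                  by_cases hea : PySem.List.pyGetD (PySem.Chars.splitOn (PySem.Chars.lower x) ['.']) (-1) []
                      = PySem.List.pyGetD (PySem.Chars.splitOn (PySem.Chars.lower y) ['.']) (-1) [] <;>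
                    by_cases hla : PySem.Chars.lower x = PySem.Chars.lower y <;>
                    simp [hea, hla, strLt_self]
              | cons y2 ys2 =>
                  simp [List.map, pathKey_singleton, pathKey_cons_cons, sort_less_loop, keyListLt, keyElemLt]
          | cons x2 xs2 =>
              cases ys with
              | nil =>
                  simp [List.map, pathKey_singleton, pathKey_cons_cons, sort_less_loop, keyListLt, keyElemLt]
              | cons y2 ys2 =>
                  simp only [List.map, pathKey_cons_cons, sort_less_loop, keyListLt, keyElemLt]
                  by_cases hla : PySem.Chars.lower x = PySem.Chars.lower y
                  · simp [hla, ih (y2 :: ys2) (by simp) (by simp)]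
                  · simp [hla]

-- ===== VERDICT (by name: the statement is the Claim_ definition above) =====
theorem sort_less_spec : Claim_equal_sort_less := by
  intro a b _
  unfold Spec_sort_less sort_less sort_less_alt
  exact loop_eq_keys _ _ (splitOn_ne_nil _ _) (splitOn_ne_nil _ _)
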